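-- pv_equiv track=rewrite | github.com/Muneeb-Ahmad-404/dsa_solutions | Arrays_n_Hashing/Find_The_Highest_Altitude_LC_1732/Find_The_Highest_Altitude_LC_1732.py | loop
-- ===== SOURCE A (Python) =====
-- def loop(attributes):
--     gain = attributes[0]
--     max = 0
--     for i in range(0, len(gain)):
--         if i == 0:
--             if gain[i] > max:
--                 max = gain[i]
--             continue
--         gain[i] += gain[i-1]
--         if gain[i] > max:
--             max = gain[i]
--     return max
-- ===== SOURCE B (Python) =====
-- def loop(attributes):
--     # divide & conquer; note: unlike A, does NOT mutate attributes[0] in place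
--     gain = attributes[0]
--
--     def go(seg):
--         # returns (sum(seg), max(0, max over nonempty prefix sums of seg))
--         if not seg:
--             return (0, 0)
--         if len(seg) == 1:
--             g = seg[0]
--             return (g, g if g > 0 else 0)
--         mid = len(seg) // 2
--         ls, lb = go(seg[:mid])
--         rs, rb = go(seg[mid:])
--         return (ls + rs, lb if lb > ls + rb else ls + rb)
--
--     return go(gain)[1]
-- ===== Notes on version B (the rewrite author's own statement) =====
-- stated objective: alternative
-- what changed: A's single fused index loop (in-place prefix-sum update with a running max) is replaced by a divide-and-conquer recursion that splits the list in half and combines (sum, best) pairs via best(l++r) = max(best_l, sum_l + best_r); B does not mutate attributes[0] (the equivalence is about the return value).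
import Mathlib
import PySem

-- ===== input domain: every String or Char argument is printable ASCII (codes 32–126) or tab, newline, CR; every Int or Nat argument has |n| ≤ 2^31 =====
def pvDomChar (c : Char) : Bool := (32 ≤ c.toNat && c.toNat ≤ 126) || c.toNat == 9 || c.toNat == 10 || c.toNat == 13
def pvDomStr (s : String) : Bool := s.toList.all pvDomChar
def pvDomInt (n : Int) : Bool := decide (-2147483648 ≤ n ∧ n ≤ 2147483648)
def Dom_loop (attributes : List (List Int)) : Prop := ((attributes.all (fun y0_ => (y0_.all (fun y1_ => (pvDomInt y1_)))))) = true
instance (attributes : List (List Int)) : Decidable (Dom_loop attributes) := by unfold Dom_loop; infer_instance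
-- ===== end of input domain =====

-- B replaces A's fused in-place prefix-sum loop with a divide-and-conquer recursion combining
-- (sum, best) pairs; same return value. A mutates attributes[0] in place, B does not: the
-- equivalence proved here is about the RETURN value only.

-- ===== PORT A =====
-- one fused loop over indices: i = 0 only updates max; i ≥ 1 sets gain[i] += gain[i-1], then updates max
def loop (attributes : List (List Int)) : Int :=
  match attributes with
  | [] => 0  -- attributes[0] raises IndexError here; excluded by Pre_loop
  | gain :: _ =>
    let st := (PySem.List.pyRange 0 (gain.length : Int)).foldl
      (fun (st : List Int × Int) (i : Int) =>
        let g := st.1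
        let mx := st.2
        if i == 0 then
          (g, if PySem.List.pyGetD g i 0 > mx then PySem.List.pyGetD g i 0 else mx)
        else
          -- i ≥ 1 and i < len g here, so g.set i.toNat is exactly Python's gain[i] = …
          let v := PySem.List.pyGetD g i 0 + PySem.List.pyGetD g (i - 1) 0
          let g' := g.set i.toNat v
          (g', if PySem.List.pyGetD g' i 0 > mx then PySem.List.pyGetD g' i 0 else mx))
      (gain, 0)
    st.2

-- ===== PORT B =====
-- divide & conquer: go seg = (sum(seg), max(0, max over nonempty prefix sums of seg));
-- combine: best(l ++ r) = max(best l, sum l + best r)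
def pvGo (seg : List Int) : Int × Int :=
  if h0 : seg = [] then (0, 0)
  else if h1 : seg.length = 1 then
    let g := PySem.List.pyGetD seg 0 0
    (g, if g > 0 then g else 0)
  else
    let mid := seg.length / 2
    let l := pvGo (seg.take mid)
    let r := pvGo (seg.drop mid)
    (l.1 + r.1, if l.2 > l.1 + r.2 then l.2 else l.1 + r.2)
termination_by seg.length
decreasing_by
  · have hne : seg.length ≠ 0 := by simpa using h0
    simp only [List.length_take]
    omega
  · have hne : seg.length ≠ 0 := by simpa using h0
    simp only [List.length_drop]
    omega

def loop_alt (attributes : List (List Int)) : Int :=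
  match attributes with
  | [] => 0  -- attributes[0] raises IndexError here; excluded by Pre_loop
  | gain :: _ => (pvGo gain).2

-- ===== PRECONDITION & SPEC =====
-- Pre_ excludes only attributes = [], where A's 'attributes[0]' raises IndexError.
def Pre_loop (attributes : List (List Int)) : Prop := attributes ≠ []
instance (attributes : List (List Int)) : Decidable (Pre_loop attributes) := by unfold Pre_loop; infer_instance
def pvWitness_loop : List (List Int) := [[-4, 3, 2, -7, 5]]

def Spec_loop (attributes : List (List Int)) (out : Int) : Prop := out = loop_alt attributes
instance (attributes : List (List Int)) (out : Int) : Decidable (Spec_loop attributes out) := by unfold Spec_loop; infer_instance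

-- ===== CLAIM (what is proved, stated in full; the proofs are below) =====
def Claim_equal_loop : Prop := ∀ (attributes : List (List Int)), Dom_loop attributes → Pre_loop attributes → Spec_loop attributes (loop attributes)

-- ===== LEMMAS AND PROOFS =====

-- functional prefix sums, used only by the proofs
def pfx (s : Int) : List Int → List Int
  | [] => []
  | g :: t => (s + g) :: pfx (s + g) t

theorem pfx_length (s : Int) (l : List Int) : (pfx s l).length = l.length := by
  induction l generalizing s with
  | nil => rfl
  | cons g t ih => simp [pfx, ih]

theorem pfx_append (s : Int) (l₁ l₂ : List Int) :
    pfx s (l₁ ++ l₂) = pfx s l₁ ++ pfx (s + l₁.sum) l₂ := by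
  induction l₁ generalizing s with
  | nil => simp [pfx]
  | cons g t ih => simp [pfx, ih, add_assoc]

theorem pfx_getLast (s : Int) (l : List Int) (h : l ≠ []) :
    (pfx s l).getD (l.length - 1) 0 = s + l.sum := by
  induction l generalizing s with
  | nil => exact absurd rfl h
  | cons g t ih =>
    cases t with
    | nil => simp [pfx]
    | cons g' t' =>
      have := ih (s + g) (by simp)
      simpa [pfx, add_assoc] using this

-- the step A folds with
def aStep (st : List Int × Int) (i : Int) : List Int × Int :=
  let g := st.1
  let mx := st.2
  if i == 0 then
    (g, if PySem.List.pyGetD g i 0 > mx then PySem.List.pyGetD g i 0 else mx)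
  else
    let v := PySem.List.pyGetD g i 0 + PySem.List.pyGetD g (i - 1) 0
    let g' := g.set i.toNat v
    (g', if PySem.List.pyGetD g' i 0 > mx then PySem.List.pyGetD g' i 0 else mx)

theorem getD_app_left (l1 l2 : List Int) (n : Nat) (h : n < l1.length) :
    (l1 ++ l2).getD n 0 = l1.getD n 0 := by
  simp [List.getD, List.getElem?_append_left h]

theorem getD_app_right (l1 l2 : List Int) (n : Nat) (h : l1.length ≤ n) :
    (l1 ++ l2).getD n 0 = l2.getD (n - l1.length) 0 := by
  simp [List.getD, List.getElem?_append_right h]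

-- invariant of A's fused loop after the first m indices
theorem a_fold (gain : List Int) (m : Nat) (hm : m ≤ gain.length) :
    (PySem.List.pyRange 0 (m : Int)).foldl aStep (gain, 0)
      = (pfx 0 (gain.take m) ++ gain.drop m,
         (pfx 0 (gain.take m)).foldl (fun a b => max a b) 0) := by
  induction m with
  | zero => simp [pfx]
  | succ m ih =>
    have hm' : m ≤ gain.length := Nat.le_of_succ_le hm
    have hlt : m < gain.length := hm
    have hrange : PySem.List.pyRange 0 ((m + 1 : Nat) : Int)
        = PySem.List.pyRange 0 (m : Int) ++ [(m : Int)] := by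
      have := PySem.List.pyRange_one_succ_right (a := 0) (b := (m : Int)) (by positivity)
      simpa using this
    rw [hrange, List.foldl_append, ih hm', List.foldl_cons, List.foldl_nil]
    have htake : gain.take (m + 1) = gain.take m ++ [gain[m]] := by
      rw [List.take_add_one, List.getElem?_eq_getElem hlt]; rfl
    rcases Nat.eq_zero_or_pos m with hz | hpos
    · subst hz
      cases gain with
      | nil => simp at hlt
      | cons g0 t =>
        simp only [aStep]
        simp [pfx, max_def]
        split_ifs <;> omega
    · have hne : ((m : Int) == 0) = false :=
        beq_eq_false_iff_ne.mpr (by exact_mod_cast hpos.ne')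
      simp only [aStep, hne, Bool.false_eq_true, if_false]
      have hlenp : (pfx 0 (gain.take m)).length = m := by
        rw [pfx_length, List.length_take]; omega
      have hgm : PySem.List.pyGetD (pfx 0 (gain.take m) ++ gain.drop m) (m : Int) 0 = gain[m] := by
        rw [PySem.List.pyGetD_natCast, getD_app_right _ _ _ (show (pfx 0 (gain.take m)).length ≤ m by rw [hlenp]), hlenp, Nat.sub_self]
        simp [List.getD, List.getElem?_drop, List.getElem?_eq_getElem hlt]
      have hgm1 : PySem.List.pyGetD (pfx 0 (gain.take m) ++ gain.drop m) ((m : Int) - 1) 0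
          = (gain.take m).sum := by
        have hc : ((m : Int) - 1) = ((m - 1 : Nat) : Int) := by omega
        rw [hc, PySem.List.pyGetD_natCast, getD_app_left _ _ _ (show m - 1 < (pfx 0 (gain.take m)).length by rw [hlenp]; omega)]
        have hne' : gain.take m ≠ [] := by
          have hl : (gain.take m).length = m := by rw [List.length_take]; omega
          intro h; rw [h] at hl; simp at hl; omega
        have hlast := pfx_getLast 0 (gain.take m) hne'
        simpa [List.length_take, Nat.min_eq_left hm'] using hlast
      rw [hgm, hgm1]
      have hset : (pfx 0 (gain.take m) ++ gain.drop m).set ((m : Int)).toNat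
            (gain[m] + (gain.take m).sum)
          = pfx 0 (gain.take (m + 1)) ++ gain.drop (m + 1) := by
        rw [Int.toNat_natCast, List.set_append_right m _ (by rw [hlenp]), hlenp, Nat.sub_self,
            htake, pfx_append]
        have hdrop : gain.drop m = gain[m] :: gain.drop (m + 1) := by
          rw [List.drop_eq_getElem_cons hlt]
        rw [hdrop, List.set_cons_zero]
        simp [pfx]
        omega
      rw [hset]
      have hval : PySem.List.pyGetD (pfx 0 (gain.take (m + 1)) ++ gain.drop (m + 1)) (m : Int) 0
          = gain[m] + (gain.take m).sum := by
        have hlenp' : (pfx 0 (gain.take (m + 1))).length = m + 1 := by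
          rw [pfx_length, List.length_take]; omega
        rw [PySem.List.pyGetD_natCast, getD_app_left _ _ _ (show m < (pfx 0 (gain.take (m + 1))).length by rw [hlenp']; omega)]
        have hne' : gain.take (m + 1) ≠ [] := by
          have hl : (gain.take (m + 1)).length = m + 1 := by rw [List.length_take]; omega
          intro h; rw [h] at hl; simp at hl
        have hlast := pfx_getLast 0 (gain.take (m + 1)) hne'
        rw [List.length_take, Nat.min_eq_left hm] at hlast
        simp only [Nat.add_sub_cancel] at hlast
        rw [hlast, htake, List.sum_append]
        simp only [List.sum_cons, List.sum_nil, add_zero, zero_add]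
        omega
      rw [hval]
      simp only [Prod.mk.injEq]
      refine ⟨trivial, ?_⟩
      rw [htake, pfx_append, List.foldl_append]
      simp only [pfx, List.foldl_cons, List.foldl_nil, zero_add]
      rw [max_def]
      split_ifs <;> omega

-- ===== B-side lemmas =====

theorem init_le_foldl_max (t : List Int) (a : Int) : a ≤ t.foldl max a := by
  induction t generalizing a with
  | nil => exact le_rfl
  | cons x xs ih => exact le_trans (le_max_left a x) (ih (max a x))

theorem mem_le_foldl_max (t : List Int) (a x : Int) (h : x ∈ t) : x ≤ t.foldl max a := by
  induction t generalizing a with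
  | nil => simp at h
  | cons y ys ih =>
    rcases List.mem_cons.mp h with rfl | h'
    · exact le_trans (le_max_right a x) (init_le_foldl_max ys (max a x))
    · exact ih (max a y) h'

theorem sum_le_best (l : List Int) : l.sum ≤ (pfx 0 l).foldl max 0 := by
  cases hl : l with
  | nil => simp [pfx]
  | cons g t =>
    have hne : l ≠ [] := by rw [hl]; simp
    rw [← hl]
    have hlast := pfx_getLast 0 l hne
    have hlen : (pfx 0 l).length = l.length := pfx_length 0 l
    have hpos : 0 < l.length := by rw [hl]; simp
    have hidx : l.length - 1 < (pfx 0 l).length := by omega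
    have hmem : (pfx 0 l).getD (l.length - 1) 0 ∈ pfx 0 l := by
      rw [List.getD_eq_getElem _ _ hidx]
      exact List.getElem_mem hidx
    have := mem_le_foldl_max (pfx 0 l) 0 _ hmem
    rw [hlast] at this
    simpa using this

-- folding max over shifted prefix sums, provided the seed dominates the shift
theorem foldl_max_pfx (r : List Int) (s a : Int) (h : s ≤ a) :
    (pfx s r).foldl max a = max a (s + (pfx 0 r).foldl max 0) := by
  induction r generalizing s a with
  | nil => simp [pfx]; omega
  | cons g t ih =>
    simp only [pfx, List.foldl_cons, zero_add]
    rw [ih (s + g) (max a (s + g)) (le_max_right a (s + g)),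
        ih g (max 0 g) (le_max_right 0 g)]
    omega

theorem best_append (l r : List Int) :
    (pfx 0 (l ++ r)).foldl max 0
      = max ((pfx 0 l).foldl max 0) (l.sum + (pfx 0 r).foldl max 0) := by
  rw [pfx_append, List.foldl_append, zero_add]
  exact foldl_max_pfx r l.sum _ (sum_le_best l)

theorem pvGo_correct (seg : List Int) :
    pvGo seg = (seg.sum, (pfx 0 seg).foldl max 0) := by
  induction seg using pvGo.induct with
  | case1 => simp [pvGo, pfx]
  | case2 seg h0 h1 =>
    rcases List.length_eq_one_iff.mp h1 with ⟨a, rfl⟩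
    simp [pvGo, pfx, PySem.List.pyGetD, PySem.List.pyIdx?, PySem.List.pyGet?, max_def]
    split_ifs <;> omega
  | case3 seg h0 h1 mid ihl ihr =>
    rw [pvGo]
    simp only [h0, h1, dite_false]
    rw [ihl, ihr]
    dsimp only
    have hsplit : seg = seg.take mid ++ seg.drop mid :=
      (List.take_append_drop mid seg).symm
    rw [Prod.mk.injEq]
    constructor
    · conv_rhs => rw [hsplit]
      rw [List.sum_append]
    · conv_rhs => rw [hsplit]
      rw [best_append]
      rw [max_def]
      split_ifs <;> omega

-- ===== VERDICT (by name: the statement is the Claim_ definition above) =====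
theorem loop_spec : Claim_equal_loop := by
  intro attributes _ hpre
  unfold Spec_loop
  cases attributes with
  | nil => exact absurd rfl hpre
  | cons gain rest =>
    have h1 : loop (gain :: rest)
        = ((PySem.List.pyRange 0 (gain.length : Int)).foldl aStep (gain, 0)).2 := rfl
    rw [h1, a_fold gain gain.length le_rfl]
    simp only [List.take_length]
    show (pfx 0 gain).foldl (fun a b => max a b) 0 = loop_alt (gain :: rest)
    simp only [loop_alt, pvGo_correct]
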